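-- pv_equiv track=rewrite | github.com/longcipher/auto-research | src/autoresearch/templates/__init__.py | _render_general
-- ===== SOURCE A (Python) =====
-- import typing
--
-- _SUMMARY_MAX_CHARS = 120
--
-- def _render_general(topic: str, readings: list[dict[str, typing.Any]]) -> str:
--     lines: list[str] = []
--     lines.append(f"# {topic}\n")
--     lines.append("## Executive Summary\n")
--     if readings:
--         lines.append(f"This report summarizes findings from {len(readings)} sources on **{topic}**.\n")
--     else:
--         lines.append("No sources were collected for this report.\n")
--
--     lines.append("## Key Findings\n")
--     if readings:
--         for i, r in enumerate(readings, 1):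
--             title = str(r.get("title", "Untitled"))
--             content = str(r.get("content", ""))
--             lines.append(
--                 f"{i}. **{title}**: {content[:_SUMMARY_MAX_CHARS]}{'...' if len(content) > _SUMMARY_MAX_CHARS else ''}"
--             )
--         lines.append("")
--     else:
--         lines.append("No findings available.\n")
--
--     lines.append("## Detailed Analysis\n")
--     if readings:
--         for r in readings:
--             title = str(r.get("title", "Untitled"))
--             content = str(r.get("content", ""))
--             lines.append(f"### {title}\n")
--             lines.append(f"{content}\n")
--     else:
--         lines.append("No data to analyze.\n")
--
--     lines.append("## Sources\n")
--     if readings: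
--         for r in readings:
--             title = str(r.get("title", "Untitled"))
--             url = str(r.get("url", ""))
--             lines.append(f"- [{title}]({url})")
--         lines.append("")
--     else:
--         lines.append("No sources were collected.\n")
--
--     return "\n".join(lines)
-- ===== SOURCE B (Python) =====
-- _SUMMARY_MAX_CHARS = 120
--
--
-- def _render_general(topic: str, readings: list) -> str:
--     # Single pass over the readings fills the three section buffers at once.
--     findings, analysis, sources = [], [], []
--     for i, r in enumerate(readings, 1):
--         title = str(r.get("title", "Untitled"))
--         content = str(r.get("content", ""))
--         url = str(r.get("url", ""))
--         findings.append(
--             f"{i}. **{title}**: {content[:_SUMMARY_MAX_CHARS]}{'...' if len(content) > _SUMMARY_MAX_CHARS else ''}"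
--         )
--         analysis.append(f"### {title}\n")
--         analysis.append(f"{content}\n")
--         sources.append(f"- [{title}]({url})")
--
--     if readings:
--         lines = (
--             [f"# {topic}\n",
--              "## Executive Summary\n",
--              f"This report summarizes findings from {len(readings)} sources on **{topic}**.\n",
--              "## Key Findings\n"]
--             + findings + [""]
--             + ["## Detailed Analysis\n"]
--             + analysis
--             + ["## Sources\n"]
--             + sources + [""]
--         )
--     else:
--         lines = [
--             f"# {topic}\n",
--             "## Executive Summary\n",
--             "No sources were collected for this report.\n",
--             "## Key Findings\n",
--             "No findings available.\n",
--             "## Detailed Analysis\n",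
--             "No data to analyze.\n",
--             "## Sources\n",
--             "No sources were collected.\n",
--         ]
--     return "\n".join(lines)
-- ===== Notes on version B (the rewrite author's own statement) =====
-- stated objective: alternative
-- what changed: A walks the readings three separate times (findings, analysis, sources); B does a single pass over enumerate(readings, 1) filling the three section buffers at once and then assembles the report from literal section lists.
import Mathlib
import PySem

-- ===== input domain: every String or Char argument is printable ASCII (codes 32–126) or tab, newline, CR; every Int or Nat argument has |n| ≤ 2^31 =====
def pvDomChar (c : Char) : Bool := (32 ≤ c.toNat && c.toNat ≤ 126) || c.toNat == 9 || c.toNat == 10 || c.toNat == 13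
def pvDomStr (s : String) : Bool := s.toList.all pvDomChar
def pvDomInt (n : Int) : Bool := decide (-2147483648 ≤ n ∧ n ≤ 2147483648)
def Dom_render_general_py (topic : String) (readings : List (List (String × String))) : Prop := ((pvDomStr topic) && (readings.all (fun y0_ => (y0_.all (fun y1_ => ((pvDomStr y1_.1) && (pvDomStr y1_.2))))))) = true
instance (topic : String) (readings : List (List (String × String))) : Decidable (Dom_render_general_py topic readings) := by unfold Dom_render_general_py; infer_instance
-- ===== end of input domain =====

-- B merges A's three sequential loops over the readings into ONE pass that fills the three
-- section buffers at once, then assembles the report; objective: alternative decomposition.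

-- shared helpers: the per-reading f-strings both Pythons compute verbatim
def pvGetS (r : List (String × String)) (k dflt : String) : String :=
  (PySem.Dict.mk r).getD k dflt

def pvFinding (i : Int) (r : List (String × String)) : String :=
  let content := pvGetS r "content" ""
  PySem.Int.toStr i ++ ". **" ++ pvGetS r "title" "Untitled" ++ "**: " ++
    PySem.Str.slice content none (some 120) ++
    (if 120 < PySem.Str.len content then "..." else "")

def pvHead (r : List (String × String)) : String := "### " ++ pvGetS r "title" "Untitled" ++ "\n"
def pvBody (r : List (String × String)) : String := pvGetS r "content" "" ++ "\n"
def pvSource (r : List (String × String)) : String :=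
  "- [" ++ pvGetS r "title" "Untitled" ++ "](" ++ pvGetS r "url" "" ++ ")"
def pvSummary (topic : String) (n : Nat) : String :=
  "This report summarizes findings from " ++ PySem.Int.toStr (n : Int) ++ " sources on **" ++ topic ++ "**.\n"

-- ===== PORT A =====
def render_general_py (topic : String) (readings : List (List (String × String))) : String :=
  let lines : List String := []
  let lines := lines ++ ["# " ++ topic ++ "\n"]
  let lines := lines ++ ["## Executive Summary\n"]
  let lines :=
    if !readings.isEmpty then lines ++ [pvSummary topic readings.length]
    else lines ++ ["No sources were collected for this report.\n"]
  let lines := lines ++ ["## Key Findings\n"]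
  let lines :=
    if !readings.isEmpty then
      ((PySem.List.enumerate readings 1).foldl
        (fun acc ir => acc ++ [pvFinding ir.1 ir.2]) lines) ++ [""]
    else lines ++ ["No findings available.\n"]
  let lines := lines ++ ["## Detailed Analysis\n"]
  let lines :=
    if !readings.isEmpty then
      readings.foldl (fun acc r => acc ++ [pvHead r] ++ [pvBody r]) lines
    else lines ++ ["No data to analyze.\n"]
  let lines := lines ++ ["## Sources\n"]
  let lines :=
    if !readings.isEmpty then
      (readings.foldl (fun acc r => acc ++ [pvSource r]) lines) ++ [""]
    else lines ++ ["No sources were collected.\n"]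
  PySem.Str.join "\n" lines

-- ===== PORT B =====
def render_general_py_alt (topic : String) (readings : List (List (String × String))) : String :=
  let bufs : List String × List String × List String :=
    (PySem.List.enumerate readings 1).foldl
      (fun acc ir =>
        (acc.1 ++ [pvFinding ir.1 ir.2],
         acc.2.1 ++ [pvHead ir.2, pvBody ir.2],
         acc.2.2 ++ [pvSource ir.2]))
      ([], [], [])
  let lines : List String :=
    if !readings.isEmpty then
      ["# " ++ topic ++ "\n", "## Executive Summary\n",
       pvSummary topic readings.length, "## Key Findings\n"]
        ++ bufs.1 ++ [""]
        ++ ["## Detailed Analysis\n"] ++ bufs.2.1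
        ++ ["## Sources\n"] ++ bufs.2.2 ++ [""]
    else
      ["# " ++ topic ++ "\n", "## Executive Summary\n",
       "No sources were collected for this report.\n",
       "## Key Findings\n", "No findings available.\n",
       "## Detailed Analysis\n", "No data to analyze.\n",
       "## Sources\n", "No sources were collected.\n"]
  PySem.Str.join "\n" lines

-- ===== PRECONDITION & SPEC =====
def Spec_render_general_py (topic : String) (readings : List (List (String × String))) (out : String) : Prop := out = render_general_py_alt topic readings
instance (topic : String) (readings : List (List (String × String))) (out : String) : Decidable (Spec_render_general_py topic readings out) := by unfold Spec_render_general_py; infer_instance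

-- ===== CLAIM (what is proved, stated in full; the proofs are below) =====
def Claim_equal_render_general_py : Prop := ∀ (topic : String) (readings : List (List (String × String))), Dom_render_general_py topic readings → Spec_render_general_py topic readings (render_general_py topic readings)

-- ===== LEMMAS AND PROOFS =====

-- A's analysis loop appends two lines per reading: it is a flatMap
theorem pv_foldl_two (l : List (List (String × String))) (acc : List String) :
    l.foldl (fun acc r => acc ++ [pvHead r] ++ [pvBody r]) acc
      = acc ++ l.flatMap (fun x => [pvHead x, pvBody x]) := by
  have h : (fun (acc : List String) (r : List (String × String)) => acc ++ [pvHead r] ++ [pvBody r])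
      = fun acc r => acc ++ [pvHead r, pvBody r] := by
    funext a r; simp
  rw [h, PySem.List.foldl_append_eq_flatMap]

-- a map over enumerate(readings, 1) that ignores the index is a map over readings
theorem pv_map_enum (f : List (String × String) → String)
    (l : List (List (String × String))) (s : Int) :
    (PySem.List.enumerate l s).map (fun ir => f ir.2) = l.map f := by
  calc (PySem.List.enumerate l s).map (fun ir => f ir.2)
      = ((PySem.List.enumerate l s).map (·.2)).map f := by rw [List.map_map]; rfl
    _ = l.map f := by rw [PySem.List.map_snd_enumerate]

theorem pv_flat_enum (l : List (List (String × String))) (s : Int) :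
    (PySem.List.enumerate l s).flatMap (fun ir => [pvHead ir.2, pvBody ir.2])
      = l.flatMap (fun x => [pvHead x, pvBody x]) := by
  calc (PySem.List.enumerate l s).flatMap (fun ir => [pvHead ir.2, pvBody ir.2])
      = ((PySem.List.enumerate l s).map (·.2)).flatMap (fun x => [pvHead x, pvBody x]) := by
        rw [List.flatMap_map]
    _ = l.flatMap (fun x => [pvHead x, pvBody x]) := by rw [PySem.List.map_snd_enumerate]

theorem render_general_eq (topic : String) (readings : List (List (String × String))) :
    render_general_py topic readings = render_general_py_alt topic readings := by
  unfold render_general_py render_general_py_alt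
  cases readings with
  | nil => rfl
  | cons r rs =>
    simp only [List.isEmpty_cons, Bool.not_false, if_true, List.nil_append]
    rw [PySem.List.foldl_prod_mk
          (f := fun (a : List String) (ir : Int × List (String × String)) => a ++ [pvFinding ir.1 ir.2])
          (g := fun (p : List String × List String) (ir : Int × List (String × String)) =>
            (p.1 ++ [pvHead ir.2, pvBody ir.2], p.2 ++ [pvSource ir.2]))]
    rw [PySem.List.foldl_prod_mk
          (f := fun (a : List String) (ir : Int × List (String × String)) => a ++ [pvHead ir.2, pvBody ir.2])
          (g := fun (a : List String) (ir : Int × List (String × String)) => a ++ [pvSource ir.2])]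
    dsimp only
    rw [pv_foldl_two]
    simp only [PySem.List.foldl_append_singleton_eq_map, PySem.List.foldl_append_eq_flatMap,
      pv_map_enum, pv_flat_enum]
    simp

-- ===== VERDICT (by name: the statement is the Claim_ definition above) =====
theorem render_general_py_spec : Claim_equal_render_general_py := by
  intro topic readings _
  unfold Spec_render_general_py
  exact render_general_eq topic readings
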